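-- pv_equiv track=rewrite | github.com/amuletofyendor/decision-ledger | decision_ledger/wiki_render.py | subject_tree_roots
-- ===== SOURCE A (Python) =====
-- def subject_tree_roots(subjects: list[str]) -> list[str]:
--     subject_set = set(subjects)
--     roots = []
--     for subject in sorted(subject_set):
--         parts = subject.split(".")
--         has_parent = any(".".join(parts[:index]) in subject_set for index in range(1, len(parts)))
--         if not has_parent:
--             roots.append(subject)
--     return roots
-- ===== SOURCE B (Python) =====
-- def subject_tree_roots(subjects: list[str]) -> list[str]:
--     # Trie-style recursion: group the (deduplicated) subjects' part lists by first
--     # part; a group whose head occurs as a complete subject contributes exactly that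
--     # head as a root, otherwise its roots are head + "." + (roots of the tails).
--     # No prefix strings are ever built or looked up in a set.
--     def rec(part_lists):
--         groups = {}
--         for parts in part_lists:
--             groups.setdefault(parts[0], []).append(parts[1:])
--         out = []
--         for head, tails in groups.items():
--             if any(t == [] for t in tails):
--                 out.append(head)
--             else:
--                 out.extend(head + "." + r for r in rec(tails))
--         return out
--     return sorted(rec([s.split(".") for s in dict.fromkeys(subjects)]))
-- ===== Notes on version B (the rewrite author's own statement) =====
-- stated objective: alternative
-- what changed: B never builds or looks up dotted prefixes: it deduplicates the subjects, splits them into part lists and recursively groups them trie-style by first part (a group whose head is itself a subject yields that head as its only root, otherwise head-dot-prefixed roots of the tails), sorting the collected roots once at the end.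
import Mathlib
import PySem

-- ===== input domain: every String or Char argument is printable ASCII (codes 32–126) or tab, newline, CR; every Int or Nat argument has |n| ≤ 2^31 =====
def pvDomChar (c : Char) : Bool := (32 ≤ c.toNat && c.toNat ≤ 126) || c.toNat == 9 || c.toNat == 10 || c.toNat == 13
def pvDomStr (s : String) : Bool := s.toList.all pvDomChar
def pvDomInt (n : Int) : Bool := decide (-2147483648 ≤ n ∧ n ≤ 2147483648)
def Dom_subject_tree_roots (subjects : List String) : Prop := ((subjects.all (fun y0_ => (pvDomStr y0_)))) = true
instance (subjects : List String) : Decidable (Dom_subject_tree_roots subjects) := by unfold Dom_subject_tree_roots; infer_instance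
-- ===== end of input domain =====

-- B replaces A's "test every dotted prefix of every subject against the set" by a trie-style
-- recursion grouping part lists by first part, building no prefix strings and doing no set
-- lookups; same return value (objective: alternative; not measured faster).

-- ===== PORT A =====
-- membership 'x in subject_set' is modelled on code-point lists (String.toList is injective, so exact)
def subject_tree_roots (subjects : List String) : List String :=
  let subject_set : PySem.Set (List Char) := PySem.Set.ofList (subjects.map String.toList)
  (PySem.List.sorted (PySem.Set.ofList subjects) (fun x => x)).foldl
    (fun roots subject =>
      let parts := PySem.Chars.splitOn subject.toList ['.']
      let has_parent := (PySem.List.pyRange 1 (parts.length : Int) 1).any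
        (fun index => subject_set.contains
          (PySem.Chars.join ['.'] (PySem.List.slice parts none (some index))))
      if !has_parent then roots ++ [subject] else roots) []

-- ===== PORT B =====
-- 'groups.setdefault(parts[0], []).append(parts[1:])' is the documented Dict.modify-append loop;
-- 'parts[0]' is ported as headD [] (split never returns an empty list, so the default is unused);
-- the Nat fuel (bounding the recursion depth by the number of parts) only makes the Python
-- recursion structural.
def altRec : Nat → List (List (List Char)) → List (List Char)
  | 0, _ => []
  | fuel + 1, partLists =>
    let groups : PySem.Dict (List Char) (List (List (List Char))) :=
      partLists.foldl
        (fun d parts => d.modify (parts.headD []) [] (fun ts => ts ++ [parts.drop 1]))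
        PySem.Dict.empty
    groups.items.foldl
      (fun out ht =>
        if ht.2.any (fun t => t.isEmpty) then out ++ [ht.1]
        else out ++ (altRec fuel ht.2).map (fun r => ht.1 ++ '.' :: r)) []

def subject_tree_roots_alt (subjects : List String) : List String :=
  let partLists := (PySem.List.dedup subjects).map (fun s => PySem.Chars.splitOn s.toList ['.'])
  PySem.List.sorted
    ((altRec ((partLists.map List.length).sum + 1) partLists).map (fun cs => String.ofList cs))
    (fun x => x)

-- ===== PRECONDITION & SPEC =====
def Spec_subject_tree_roots (subjects : List String) (out : List String) : Prop := out = subject_tree_roots_alt subjects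
instance (subjects : List String) (out : List String) : Decidable (Spec_subject_tree_roots subjects out) := by unfold Spec_subject_tree_roots; infer_instance

-- ===== CLAIM (what is proved, stated in full; the proofs are below) =====
def Claim_equal_subject_tree_roots : Prop := ∀ (subjects : List String), Dom_subject_tree_roots subjects → Spec_subject_tree_roots subjects (subject_tree_roots subjects)

-- ===== LEMMAS AND PROOFS =====

-- a structural reformulation of splitting on '.'
def spD : List Char → List (List Char)
  | [] => [[]]
  | c :: rest =>
    if c = '.' then [] :: spD rest
    else
      match spD rest with
      | [] => [[c]]
      | p :: ps => (c :: p) :: ps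

def joinD (l : List (List Char)) : List Char := PySem.Chars.join ['.'] l

theorem spD_ne_nil (l : List Char) : spD l ≠ [] := by
  cases l with
  | nil => simp [spD]
  | cons c rest =>
    simp only [spD]
    split
    · simp
    · split <;> simp

theorem go_spec (fuel : Nat) (l cur : List Char) (acc : List (List Char))
    (h : l.length < fuel) :
    PySem.Chars.splitOn.go ['.'] fuel l cur acc
      = acc.reverse ++
        (match spD l with
         | [] => [cur.reverse]
         | p :: ps => (cur.reverse ++ p) :: ps) := by
  induction fuel generalizing l cur acc with
  | zero => omega
  | succ fuel ih =>
    cases l with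
    | nil => simp [PySem.Chars.splitOn.go, spD]
    | cons c rest =>
      by_cases hc : c = '.'
      · subst hc
        have hpre : List.isPrefixOf ['.'] ('.' :: rest) = true := by
          simp [List.isPrefixOf]
        rw [PySem.Chars.splitOn.go]
        simp only [hpre, if_true, List.drop_succ_cons, List.drop_zero, List.length_singleton]
        rw [ih rest [] (cur.reverse :: acc) (by simp at h; omega)]
        simp only [spD, if_true]
        cases hsp : spD rest with
        | nil => exact absurd hsp (spD_ne_nil rest)
        | cons p ps => simp
      · have hpre : List.isPrefixOf ['.'] (c :: rest) = false := by
          simp [List.isPrefixOf]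
          intro hcc
          exact absurd hcc.symm hc
        rw [PySem.Chars.splitOn.go]
        simp only [hpre, Bool.false_eq_true, if_false]
        rw [ih rest (c :: cur) acc (by simp at h; omega)]
        simp only [spD, hc, if_false]
        cases hsp : spD rest with
        | nil => exact absurd hsp (spD_ne_nil rest)
        | cons p ps => simp

theorem splitOn_eq_spD (l : List Char) : PySem.Chars.splitOn l ['.'] = spD l := by
  show PySem.Chars.splitOn.go ['.'] (l.length + 1) l [] [] = spD l
  rw [go_spec (l.length + 1) l [] [] (by omega)]
  cases hsp : spD l with
  | nil => exact absurd hsp (spD_ne_nil l)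
  | cons p ps => simp

theorem joinD_cons_cons (p q : List Char) (ps : List (List Char)) :
    joinD (p :: q :: ps) = p ++ '.' :: joinD (q :: ps) := by
  rw [joinD, PySem.Chars.join_cons_cons]
  simp [joinD]

theorem joinD_singleton (p : List Char) : joinD [p] = p := PySem.Chars.join_singleton ['.'] p

theorem join_spD (l : List Char) : joinD (spD l) = l := by
  induction l with
  | nil => simp [spD, joinD, PySem.Chars.join_singleton]
  | cons c rest ih =>
    simp only [spD]
    by_cases hc : c = '.'
    · subst hc
      simp only [if_true]
      cases hsp : spD rest with
      | nil => exact absurd hsp (spD_ne_nil rest)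
      | cons p ps =>
        rw [hsp] at ih
        rw [joinD_cons_cons, ih]
        simp
    · simp only [hc, if_false]
      cases hsp : spD rest with
      | nil => exact absurd hsp (spD_ne_nil rest)
      | cons p ps =>
        rw [hsp] at ih
        cases ps with
        | nil => rw [joinD_singleton]; rw [joinD_singleton] at ih; rw [ih]
        | cons q qs =>
          rw [joinD_cons_cons] at ih ⊢
          rw [List.cons_append, ih]

theorem spD_injective : Function.Injective spD := by
  intro a b hab
  have h1 := join_spD a
  rw [hab, join_spD] at h1
  exact h1.symm

theorem noDot_spD (l : List Char) : ∀ p ∈ spD l, '.' ∉ p := by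
  induction l with
  | nil => simp [spD]
  | cons c rest ih =>
    simp only [spD]
    by_cases hc : c = '.'
    · subst hc
      simp only [if_true]
      intro p hp
      rcases List.mem_cons.mp hp with hp | hp
      · simp [hp]
      · exact ih p hp
    · simp only [hc, if_false]
      cases hsp : spD rest with
      | nil => exact absurd hsp (spD_ne_nil rest)
      | cons q qs =>
        intro p hp
        rcases List.mem_cons.mp hp with hp | hp
        · subst hp
          intro hmem
          rcases List.mem_cons.mp hmem with hmem | hmem
          · exact hc hmem.symm
          · exact ih q (by rw [hsp]; exact List.mem_cons_self) hmem
        · exact ih p (by rw [hsp]; exact List.mem_cons_of_mem _ hp)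

theorem spD_no_dot (p : List Char) (h : '.' ∉ p) : spD p = [p] := by
  induction p with
  | nil => simp [spD]
  | cons c rest ih =>
    have hc : c ≠ '.' := fun hcc => h (by simp [hcc])
    have hr : '.' ∉ rest := fun hm => h (List.mem_cons_of_mem _ hm)
    simp only [spD, hc, if_false]
    rw [ih hr]

theorem spD_append_dot (p t : List Char) (h : '.' ∉ p) :
    spD (p ++ '.' :: t) = p :: spD t := by
  induction p with
  | nil => simp [spD]
  | cons c rest ih =>
    have hc : c ≠ '.' := fun hcc => h (by simp [hcc])
    have hr : '.' ∉ rest := fun hm => h (List.mem_cons_of_mem _ hm)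
    simp only [List.cons_append, spD, hc, if_false]
    rw [ih hr]

theorem spD_joinD (parts : List (List Char)) (hne : parts ≠ [])
    (hdot : ∀ p ∈ parts, '.' ∉ p) : spD (joinD parts) = parts := by
  induction parts with
  | nil => exact absurd rfl hne
  | cons p ps ih =>
    cases ps with
    | nil =>
      rw [joinD_singleton]
      exact spD_no_dot p (hdot p List.mem_cons_self)
    | cons q qs =>
      rw [joinD_cons_cons, spD_append_dot p _ (hdot p List.mem_cons_self)]
      rw [ih (by simp) (fun r hr => hdot r (List.mem_cons_of_mem _ hr))]

-- "parts has a proper leading-parts ancestor inside L", stated at the parts level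
def ancP (L : List (List (List Char))) (parts : List (List Char)) : Bool :=
  (List.range parts.length).any (fun k => decide (1 ≤ k) && decide (parts.take k ∈ L))

-- grouping a list by distinct key values is a permutation of it
theorem perm_flatMap_groups {κ α : Type} [DecidableEq κ] (K : List κ) (key : α → κ) :
    ∀ (L : List α), K.Nodup → (∀ p ∈ L, key p ∈ K) →
      (K.flatMap (fun h => L.filter (fun p => decide (key p = h)))).Perm L := by
  induction K with
  | nil =>
    intro L _ hkeys
    cases L with
    | nil => simp
    | cons p ps => exact absurd (hkeys p List.mem_cons_self) (by simp)
  | cons h K' ih =>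
    intro L hnd hkeys
    rw [List.flatMap_cons]
    refine List.Perm.trans ?_ (List.filter_append_perm (fun p => decide (key p = h)) L)
    apply List.Perm.append_left
    have hf : ∀ h' ∈ K',
        L.filter (fun p => decide (key p = h'))
          = (L.filter (fun p => !decide (key p = h))).filter (fun p => decide (key p = h')) := by
      intro h' hh'
      rw [List.filter_filter]
      apply List.filter_congr
      intro p _
      by_cases hkey : key p = h'
      · have hne : h' ≠ h := fun he => (List.nodup_cons.mp hnd).1 (he ▸ hh')
        simp [hkey, hne]
      · simp [hkey]
    have hflat : K'.flatMap (fun h' => L.filter (fun p => decide (key p = h')))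
        = K'.flatMap (fun h' => (L.filter (fun p => !decide (key p = h))).filter
            (fun p => decide (key p = h'))) := by
      rw [List.flatMap_def, List.flatMap_def]
      congr 1
      exact List.map_congr_left hf
    rw [hflat]
    apply ih
    · exact (List.nodup_cons.mp hnd).2
    · intro p hp
      rw [List.mem_filter] at hp
      have := hkeys p hp.1
      rcases List.mem_cons.mp this with he | hm
      · exact absurd (by simpa using hp.2) (by simp [he])
      · exact hm

theorem perm_flatMap_congr {κ β : Type} (K : List κ) (f g : κ → List β)
    (h : ∀ a ∈ K, (f a).Perm (g a)) : (K.flatMap f).Perm (K.flatMap g) := by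
  induction K with
  | nil => simp
  | cons a K' ih =>
    rw [List.flatMap_cons, List.flatMap_cons]
    exact (h a List.mem_cons_self).append (ih (fun b hb => h b (List.mem_cons_of_mem _ hb)))

-- a nonempty list is its head followed by its tail
theorem eq_head_drop {α : Type} (p : List α) (d : α) (h : p ≠ []) : p = p.headD d :: p.drop 1 := by
  cases p with
  | nil => exact absurd rfl h
  | cons a t => rfl

-- the per-group branch of altRec equals (up to permutation) the group's part of the filter
theorem group_branch (fuel : Nat) (L : List (List (List Char))) (h : List Char)
    (hL1 : ∀ p ∈ L, p ≠ []) (hL2 : ∀ p ∈ L, p.length ≤ fuel + 1) (hnd : L.Nodup)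
    (IH : ∀ M, (∀ p ∈ M, p ≠ []) → (∀ p ∈ M, p.length ≤ fuel) → M.Nodup →
      (altRec fuel M).Perm ((M.filter (fun p => !ancP M p)).map joinD)) :
    (if ((L.filter (fun p => p.headD [] == h)).map (fun p => p.drop 1)).any (fun t => t.isEmpty)
      then [h]
      else (altRec fuel ((L.filter (fun p => p.headD [] == h)).map (fun p => p.drop 1))).map
        (fun r => h ++ '.' :: r)).Perm
    (((L.filter (fun p => p.headD [] == h)).filter (fun p => !ancP L p)).map joinD) := by
  set G := L.filter (fun p => p.headD [] == h) with hG
  set T := G.map (fun p => p.drop 1) with hT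
  have hmemG : ∀ p, p ∈ G ↔ p ∈ L ∧ p.headD [] = h := by
    intro p; rw [hG, List.mem_filter]; simp
  have hshape : ∀ p ∈ G, p = h :: p.drop 1 := by
    intro p hp
    have h1 := (hmemG p).mp hp
    have h2 := eq_head_drop p [] (hL1 p h1.1)
    rw [h1.2] at h2
    exact h2
  have hTmem : ∀ x, x ∈ T ↔ h :: x ∈ L := by
    intro x
    constructor
    · intro hx
      rw [hT] at hx
      obtain ⟨p, hp, hpx⟩ := List.mem_map.mp hx
      have := hshape p hp
      rw [hpx] at this
      rw [← this]
      exact ((hmemG p).mp hp).1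
    · intro hx
      rw [hT]
      apply List.mem_map.mpr
      refine ⟨h :: x, ?_, rfl⟩
      exact (hmemG (h :: x)).mpr ⟨hx, rfl⟩
  by_cases hany : T.any (fun t => t.isEmpty) = true
  · -- the bare head h is itself a subject: it is the single root of this group
    rw [if_pos hany]
    have hhL : [h] ∈ L := by
      rw [List.any_eq_true] at hany
      obtain ⟨t, ht, hte⟩ := hany
      rw [List.isEmpty_iff] at hte
      rw [hte] at ht
      exact (hTmem []).mp ht
    have hfc : G.filter (fun p => !ancP L p) = G.filter (fun p => p == [h]) := by
      apply List.filter_congr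
      intro p hp
      by_cases hph : p = [h]
      · subst hph
        simp [ancP]
      · have hp2 : p = h :: p.drop 1 := hshape p hp
        have hne : p.drop 1 ≠ [] := by
          intro he
          rw [he] at hp2
          exact hph hp2
        have hlen : 2 ≤ p.length := by
          rw [hp2, List.length_cons]
          cases hd : p.drop 1 with
          | nil => exact absurd hd hne
          | cons a t => rw [List.length_cons]; omega
        have hanc : ancP L p = true := by
          rw [ancP, List.any_eq_true]
          refine ⟨1, List.mem_range.mpr (by omega), ?_⟩
          have : p.take 1 = [h] := by
            rw [hp2]; rfl
          simp [this, hhL]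
        simp [hanc, hph]
    rw [hfc, List.filter_beq]
    have hcount : G.count [h] = 1 := by
      have hmem : [h] ∈ G := (hmemG [h]).mpr ⟨hhL, rfl⟩
      have hndG : G.Nodup := List.Nodup.filter _ hnd
      exact List.count_eq_one_of_mem hndG hmem
    rw [hcount]
    simp [joinD_singleton]
  · -- the bare head is not a subject: recurse into the tails
    rw [if_neg hany]
    have hnotin : [h] ∉ L := by
      intro hin
      apply hany
      rw [List.any_eq_true]
      exact ⟨[], (hTmem []).mpr hin, rfl⟩
    have htailne : ∀ p ∈ G, p.drop 1 ≠ [] := by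
      intro p hp he
      have h2 := hshape p hp
      rw [he] at h2
      rw [h2] at hp
      exact hnotin ((hmemG [h]).mp hp).1
    have hTne : ∀ t ∈ T, t ≠ [] := by
      intro t ht
      obtain ⟨p, hp, hpt⟩ := List.mem_map.mp ht
      rw [← hpt]
      exact htailne p hp
    have hTlen : ∀ t ∈ T, t.length ≤ fuel := by
      intro t ht
      obtain ⟨p, hp, hpt⟩ := List.mem_map.mp ht
      have := hL2 p ((hmemG p).mp hp).1
      rw [← hpt]
      simp only [List.length_drop]
      omega
    have hTnd : T.Nodup := by
      apply List.Nodup.map_on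
      · intro x hx y hy hxy
        have h1 := hshape x hx
        have h2 := hshape y hy
        rw [h1, h2, hxy]
      · exact List.Nodup.filter _ hnd
    have hrec := IH T hTne hTlen hTnd
    -- the ancestor test inside the group reduces to the ancestor test on the tails
    have hanc_shift : ∀ p ∈ G, ancP L p = ancP T (p.drop 1) := by
      intro p hp
      have hp2 : p = h :: p.drop 1 := hshape p hp
      set t := p.drop 1 with htdef
      rw [Bool.eq_iff_iff, ancP, ancP, List.any_eq_true, List.any_eq_true]
      constructor
      · rintro ⟨k, hk, hcond⟩
        simp only [List.mem_range] at hk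
        simp only [Bool.and_eq_true, decide_eq_true_eq] at hcond
        obtain ⟨hk1, hmem⟩ := hcond
        rcases Nat.lt_or_ge k 2 with hk2 | hk2
        · -- k = 1 : p.take 1 = [h] ∈ L, contradiction
          have hkeq : k = 1 := by omega
          rw [hkeq, hp2] at hmem
          simp at hmem
          exact absurd hmem hnotin
        · refine ⟨k - 1, ?_, ?_⟩
          · simp only [List.mem_range]
            rw [hp2] at hk
            simp at hk
            omega
          · simp only [Bool.and_eq_true, decide_eq_true_eq]
            refine ⟨by omega, ?_⟩
            rw [hTmem]
            have : p.take k = h :: t.take (k - 1) := by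
              rw [hp2]
              cases k with
              | zero => omega
              | succ k' => simp [List.take_succ_cons]
            rw [← this]
            exact hmem
      · rintro ⟨j, hj, hcond⟩
        simp only [List.mem_range] at hj
        simp only [Bool.and_eq_true, decide_eq_true_eq] at hcond
        obtain ⟨hj1, hmem⟩ := hcond
        refine ⟨j + 1, ?_, ?_⟩
        · simp only [List.mem_range]
          rw [hp2]
          simp
          omega
        · simp only [Bool.and_eq_true, decide_eq_true_eq]
          refine ⟨by omega, ?_⟩
          have : p.take (j + 1) = h :: t.take j := by
            rw [hp2]; simp [List.take_succ_cons]
          rw [this]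
          exact (hTmem (t.take j)).mp hmem
    -- rewrite the RHS through the tails
    have hrhs : (G.filter (fun p => !ancP L p)).map joinD
        = ((T.filter (fun t => !ancP T t)).map joinD).map (fun r => h ++ '.' :: r) := by
      have h1 : G.filter (fun p => !ancP L p) = G.filter (fun p => !ancP T (p.drop 1)) := by
        apply List.filter_congr
        intro p hp
        rw [hanc_shift p hp]
      have h2 : T.filter (fun t => !ancP T t)
          = (G.filter (fun p => !ancP T (p.drop 1))).map (fun p => p.drop 1) := by
        rw [hT, List.filter_map]
        rfl
      rw [h1, h2, List.map_map, List.map_map]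
      apply List.map_congr_left
      intro p hp
      rw [List.mem_filter] at hp
      have hp2 : p = h :: p.drop 1 := hshape p hp.1
      have hne : p.drop 1 ≠ [] := htailne p hp.1
      simp only [Function.comp]
      conv_lhs => rw [hp2]
      cases hd : p.drop 1 with
      | nil => exact absurd hd hne
      | cons q qs => rw [joinD_cons_cons]
    rw [hrhs]
    exact hrec.map _
-- the main lemma: altRec computes exactly the joined roots, up to permutation
theorem rec_perm : ∀ (fuel : Nat) (L : List (List (List Char))),
    (∀ p ∈ L, p ≠ []) → (∀ p ∈ L, p.length ≤ fuel) → L.Nodup →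
    (altRec fuel L).Perm ((L.filter (fun p => !ancP L p)).map joinD) := by
  intro fuel
  induction fuel with
  | zero =>
    intro L hne hlen _
    cases L with
    | nil => simp [altRec]
    | cons p ps =>
      exact absurd (List.length_eq_zero_iff.mp
        (Nat.le_zero.mp (hlen p List.mem_cons_self))) (hne p List.mem_cons_self)
  | succ fuel ih =>
    intro L hne hlen hnd
    -- characterise the groups dictionary
    set key : List (List Char) → List Char := fun p => p.headD [] with hkeydef
    set groups : PySem.Dict (List Char) (List (List (List Char))) :=
      L.foldl (fun d parts => d.modify (parts.headD []) [] (fun ts => ts ++ [parts.drop 1]))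
        PySem.Dict.empty with hgroups
    have hkeys : groups.keys = PySem.Set.ofList (L.map key) := by
      rw [hgroups, PySem.Dict.keys_foldl_modify_key L key [] (fun _ parts => (fun ts => ts ++ [parts.drop 1]))]
      rw [PySem.Dict.keys_empty, PySem.Set.update_nil_left]
    have hndkeys : groups.keys.Nodup := by
      rw [hgroups]
      exact PySem.Dict.nodup_keys_foldl_modify_key L key [] _ PySem.Dict.empty (by simp [PySem.Dict.keys_empty])
    have hgetD : ∀ h, groups.getD h []
        = (L.filter (fun p => key p == h)).map (fun p => p.drop 1) := by
      intro h
      have hfold : groups = (L.map (fun p => (key p, p.drop 1))).foldl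
          (fun d pr => d.modify pr.1 [] (fun ts => ts ++ [pr.2])) PySem.Dict.empty := by
        rw [hgroups, List.foldl_map]
      rw [hfold, PySem.Dict.getD_foldl_modify_append, PySem.Dict.getD_empty, List.nil_append]
      rw [List.filter_map, List.map_map]
      rfl
    have hitems : groups.items = groups.keys.map (fun h => (h, groups.getD h [])) :=
      PySem.Dict.items_eq_map_keys groups hndkeys []
    set K := groups.keys with hK
    -- flatten altRec into a flatMap over the keys
    have hfold2 : altRec (fuel + 1) L = K.flatMap (fun h =>
        if ((L.filter (fun p => key p == h)).map (fun p => p.drop 1)).any (fun t => t.isEmpty)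
        then [h]
        else (altRec fuel ((L.filter (fun p => key p == h)).map (fun p => p.drop 1))).map
          (fun r => h ++ '.' :: r)) := by
      show groups.items.foldl
        (fun out ht =>
          if ht.2.any (fun t => t.isEmpty) then out ++ [ht.1]
          else out ++ (altRec fuel ht.2).map (fun r => ht.1 ++ '.' :: r)) [] = _
      have hstep : (fun (out : List (List Char)) (ht : List Char × List (List (List Char))) =>
          if ht.2.any (fun t => t.isEmpty) then out ++ [ht.1]
          else out ++ (altRec fuel ht.2).map (fun r => ht.1 ++ '.' :: r))
          = fun out ht => out ++ (if ht.2.any (fun t => t.isEmpty) then [ht.1]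
            else (altRec fuel ht.2).map (fun r => ht.1 ++ '.' :: r)) := by
        funext out ht
        split <;> rfl
      rw [hstep, PySem.List.foldl_append_eq_flatMap, List.nil_append, hitems, List.flatMap_map]
      congr 1
      funext h
      rw [hgetD h]
    rw [hfold2]
    -- the target, regrouped by key
    have hkeysmem : ∀ p ∈ L, key p ∈ K := by
      intro p hp
      have hmem : key p ∈ PySem.Set.ofList (L.map key) :=
        (PySem.Set.mem_ofList _ _).mpr (List.mem_map_of_mem hp)
      rw [← hkeys] at hmem
      exact hmem
    have hgroupperm : (K.flatMap (fun h => L.filter (fun p => decide (key p = h)))).Perm L := by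
      exact perm_flatMap_groups K key L hndkeys hkeysmem
    have htarget : ((L.filter (fun p => !ancP L p)).map joinD).Perm
        (K.flatMap (fun h => ((L.filter (fun p => key p == h)).filter
          (fun p => !ancP L p)).map joinD)) := by
      have h1 := (hgroupperm.filter (fun p => !ancP L p)).map joinD
      refine List.Perm.trans h1.symm ?_
      rw [List.filter_flatMap, List.map_flatMap]
      apply perm_flatMap_congr
      intro h _
      have : (L.filter (fun p => decide (key p = h))) = (L.filter (fun p => key p == h)) := by
        apply List.filter_congr
        intro p _
        by_cases he : key p = h
        · simp [he]
        · simp [he]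
      rw [this]
    refine List.Perm.trans ?_ htarget.symm
    apply perm_flatMap_congr
    intro h _
    exact group_branch fuel L h hne hlen hnd ih

-- A's inner any over pyRange is the guarded any over List.range
theorem shift_guard (f : Nat → Bool) (n : Nat) :
    (List.range n).any (fun k => decide (1 ≤ k) && f k)
      = (List.range ((n : Int) - 1).toNat).any (fun k => f (1 + k)) := by
  cases n with
  | zero => simp
  | succ m =>
    have hm : ((m + 1 : Nat) : Int) - 1 = (m : Int) := by push_cast; ring
    rw [hm, Int.toNat_natCast, List.range_succ_eq_map, List.any_cons, List.any_map]
    have h0 : (decide (1 ≤ 0) && f 0) = false := by simp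
    rw [h0, Bool.false_or]
    apply List.any_congr rfl
    intro k
    simp only [Function.comp_def]
    have h1 : decide (1 ≤ k.succ) = true := by simp
    rw [h1, Bool.true_and]
    have h2 : k.succ = 1 + k := by omega
    rw [h2]

-- Set.ofList commutes with mapping the injective String.toList
theorem foldl_add_map_toList (xs : List String) :
    ∀ acc : PySem.Set String,
      (xs.map String.toList).foldl PySem.Set.add (acc.map String.toList)
        = (xs.foldl PySem.Set.add acc).map String.toList := by
  induction xs with
  | nil => intro acc; simp
  | cons x xs ih =>
    intro acc
    rw [List.map_cons, List.foldl_cons, List.foldl_cons]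
    have hadd : PySem.Set.add (acc.map String.toList) x.toList
        = (PySem.Set.add acc x).map String.toList := by
      have hcont : PySem.Set.contains (acc.map String.toList) x.toList
          = PySem.Set.contains acc x := by
        simp only [PySem.Set.contains]
        rw [Bool.eq_iff_iff]
        simp only [List.contains_iff_mem, List.mem_map]
        constructor
        · rintro ⟨s, hs, he⟩
          have : s = x := by
            have := congrArg String.ofList he
            simpa using this
          rw [← this]; exact hs
        · intro hx; exact ⟨x, hx, rfl⟩
      simp only [PySem.Set.add, hcont]
      by_cases hc2 : PySem.Set.contains acc x = true
      · rw [if_pos hc2, if_pos hc2]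
      · rw [if_neg hc2, if_neg hc2]
        simp
    rw [hadd]
    exact ih (PySem.Set.add acc x)

theorem ofList_map_toList (xs : List String) :
    PySem.Set.ofList (xs.map String.toList) = (PySem.Set.ofList xs).map String.toList := by
  rw [PySem.Set.ofList_eq_foldl, PySem.Set.ofList_eq_foldl]
  have := foldl_add_map_toList xs []
  simpa using this

-- my own append-if fold lemma, in the exact shape of port A's loop
theorem foldl_append_if_id {α : Type} (p : α → Bool) (l : List α) :
    ∀ acc : List α,
      l.foldl (fun acc x => if p x then acc ++ [x] else acc) acc = acc ++ l.filter p := by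
  induction l with
  | nil => intro acc; simp
  | cons x xs ih =>
    intro acc
    rw [List.foldl_cons, List.filter_cons]
    by_cases hx : p x = true
    · rw [if_pos hx, if_pos hx, ih]
      simp
    · rw [if_neg hx, if_neg hx, ih]

-- membership bridge: a joined dot-free parts list is a subject iff the parts list is in L
theorem contains_join_iff (subjects : List String) (parts' : List (List Char))
    (hne : parts' ≠ []) (hdot : ∀ x ∈ parts', '.' ∉ x) :
    (PySem.Set.ofList (subjects.map String.toList)).contains (joinD parts')
      = decide (parts' ∈ ((PySem.Set.ofList subjects).map String.toList).map spD) := by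
  rw [ofList_map_toList]
  rw [Bool.eq_iff_iff]
  simp only [PySem.Set.contains, List.contains_iff_mem, decide_eq_true_eq]
  constructor
  · intro hmem
    rw [List.mem_map] at hmem
    obtain ⟨s, hs, he⟩ := hmem
    rw [List.map_map]
    apply List.mem_map.mpr
    refine ⟨s, hs, ?_⟩
    simp only [Function.comp]
    rw [he, spD_joinD parts' hne hdot]
  · intro hmem
    rw [List.map_map, List.mem_map] at hmem
    obtain ⟨s, hs, he⟩ := hmem
    simp only [Function.comp] at he
    apply List.mem_map.mpr
    refine ⟨s, hs, ?_⟩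
    rw [← he, join_spD]

-- ===== VERDICT (by name: the statement is the Claim_ definition above) =====
theorem subject_tree_roots_spec : Claim_equal_subject_tree_roots := by
  intro subjects _
  unfold Spec_subject_tree_roots
  set distinct := PySem.Set.ofList subjects with hdistinct
  set S : List (List Char) := distinct.map String.toList with hS
  set L : List (List (List Char)) := S.map spD with hL
  set predB : String → Bool := fun s => !ancP L (spD s.toList) with hpredB
  -- Port A as a filter of the sorted distinct subjects
  have hA : subject_tree_roots subjects
      = (PySem.List.sorted distinct (fun x => x)).filter predB := by
    have h2 := foldl_append_if_id
      (fun subject =>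
        !(PySem.List.pyRange 1 ((PySem.Chars.splitOn subject.toList ['.']).length : Int) 1).any
          (fun index => (PySem.Set.ofList (subjects.map String.toList)).contains
            (PySem.Chars.join ['.']
              (PySem.List.slice (PySem.Chars.splitOn subject.toList ['.']) none (some index)))))
      (PySem.List.sorted distinct (fun x => x)) []
    refine h2.trans ?_
    rw [List.nil_append]
    apply List.filter_congr
    intro s _
    simp only [splitOn_eq_spD]
    set parts := spD s.toList with hparts
    congr 1
    -- A's any over pyRange equals the guarded any over range with set membership = list membership
    have hchain :
        (PySem.List.pyRange 1 ((parts.length : Int)) 1).any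
          (fun index => (PySem.Set.ofList (subjects.map String.toList)).contains
            (PySem.Chars.join ['.'] (PySem.List.slice parts none (some index))))
        = (List.range ((parts.length : Int) - 1).toNat).any
          (fun k => (PySem.Set.ofList (subjects.map String.toList)).contains
            (joinD (parts.take (1 + k)))) := by
      rw [PySem.List.pyRange_one, List.any_map]
      apply List.any_congr rfl
      intro k
      simp only [Function.comp_def]
      have hsl : PySem.List.slice parts none (some (1 + (k : Int)))
          = parts.take (1 + (k : Int)).toNat := PySem.List.slice_to _ (by omega)
      have htn : ((1 : Int) + (k : Int)).toNat = 1 + k := by omega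
      rw [hsl, htn]
      rfl
    rw [hchain, ← shift_guard
      (fun k => (PySem.Set.ofList (subjects.map String.toList)).contains (joinD (parts.take k)))
      parts.length]
    rw [ancP]
    apply List.any_congr rfl
    intro k
    by_cases hk : 1 ≤ k
    · simp only [hk, decide_true, Bool.true_and]
      rw [contains_join_iff subjects (parts.take k)]
      · intro he
        have : parts = [] := by
          rcases (List.take_eq_nil_iff).mp he with h1 | h1
          · omega
          · exact h1
        exact spD_ne_nil s.toList (hparts ▸ this)
      · intro x hx
        exact noDot_spD s.toList x (List.mem_of_mem_take hx)
    · simp [hk]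
  -- Port B as a sorted permutation of the same filter
  have hLne : ∀ p ∈ L, p ≠ [] := by
    intro p hp
    rw [hL, List.mem_map] at hp
    obtain ⟨cs, _, he⟩ := hp
    rw [← he]
    exact spD_ne_nil cs
  have hLnd : L.Nodup := by
    have hinj : Function.Injective String.toList := by
      intro a b h
      have h2 := congrArg String.ofList h
      simpa using h2
    rw [hL, hS]
    exact List.Nodup.map spD_injective (List.Nodup.map hinj (PySem.Set.nodup_ofList subjects))
  have hB : subject_tree_roots_alt subjects
      = PySem.List.sorted ((altRec ((L.map List.length).sum + 1) L).map
          (fun cs => String.ofList cs)) (fun x => x) := by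
    show PySem.List.sorted
        ((altRec ((((PySem.List.dedup subjects).map (fun s => PySem.Chars.splitOn s.toList ['.'])).map
            List.length).sum + 1)
          ((PySem.List.dedup subjects).map (fun s => PySem.Chars.splitOn s.toList ['.']))).map
          (fun cs => String.ofList cs)) (fun x => x) = _
    have hplists : (PySem.List.dedup subjects).map (fun s => PySem.Chars.splitOn s.toList ['.']) = L := by
      rw [PySem.List.dedup_eq_ofList, hL, hS, ← hdistinct, List.map_map]
      apply List.map_congr_left
      intro s _
      simp only [Function.comp]
      rw [splitOn_eq_spD]
    rw [hplists]
  have hfuel : ∀ p ∈ L, p.length ≤ (L.map List.length).sum + 1 := by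
    intro p hp
    have : p.length ∈ L.map List.length := List.mem_map_of_mem hp
    have := List.le_sum_of_mem this
    omega
  have hperm := rec_perm ((L.map List.length).sum + 1) L hLne hfuel hLnd
  -- the filtered part lists map back exactly onto the filtered subjects
  have hmapback2 : ((L.filter (fun p => !ancP L p)).map joinD).map (fun cs => String.ofList cs)
      = distinct.filter predB := by
    have e1 : L.filter (fun p => !ancP L p)
        = (S.filter ((fun p => !ancP L p) ∘ spD)).map spD := List.filter_map
    have e2 : S.filter ((fun p => !ancP L p) ∘ spD)
        = (distinct.filter (((fun p => !ancP L p) ∘ spD) ∘ String.toList)).map String.toList :=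
      List.filter_map
    rw [e1, e2, List.map_map, List.map_map, List.map_map]
    simp only [Function.comp_def]
    have e3 : ∀ s ∈ distinct.filter (fun s => !ancP L (spD s.toList)),
        String.ofList (joinD (spD s.toList)) = s := by
      intro s _
      rw [join_spD]
      simp
    rw [List.map_congr_left e3]
    simp only [List.map_id_fun', id_eq]
    rw [hpredB]
  -- assemble
  have hpermB : ((PySem.List.sorted distinct (fun x => x)).filter predB).Perm
      ((altRec ((L.map List.length).sum + 1) L).map (fun cs => String.ofList cs)) := by
    have h1 : ((PySem.List.sorted distinct (fun x => x)).filter predB).Perm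
        (distinct.filter predB) :=
      (PySem.List.sorted_perm distinct (fun x => x) false).filter predB
    have h2 := (hperm.map (fun cs => String.ofList cs))
    rw [hmapback2] at h2
    exact h1.trans h2.symm
  have hpair : ((PySem.List.sorted distinct (fun x => x)).filter predB).Pairwise
      (fun a b => a < b) := by
    apply List.Pairwise.filter
    exact PySem.List.sorted_ofList_pairwise_lt subjects
  rw [hA, hB]
  exact (PySem.List.sorted_eq_of_perm_of_pairwise_lt _ _ (fun x => x) hpermB hpair).symm
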